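-- pv_equiv track=rewrite | github.com/QuangPhung15/CompetitiveProgramming | codeforce/Python/800/I_love_%username%.py | solve
-- ===== SOURCE A (Python) =====
-- def solve(n, points):
-- 	res = 0
-- 	mn, mx = points[0], points[0]
--
-- 	for i in range(1, n):
-- 		if (points[i] < mn):
-- 			res += 1
--
-- 		if (points[i] > mx):
-- 			res += 1
--
-- 		mn = min(mn, points[i])
-- 		mx = max(mx, points[i])
--
-- 	return res
-- ===== SOURCE B (Python) =====
-- from itertools import accumulate
--
--
-- def solve(n, points):
--     pts = points[:max(n, 0)]
--     pmin = list(accumulate(pts, min))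
--     pmax = list(accumulate(pts, max))
--     return (sum(b < a for a, b in zip(pmin, pmin[1:]))
--             + sum(b > a for a, b in zip(pmax, pmax[1:])))
-- ===== Notes on version B (the rewrite author's own statement) =====
-- stated objective: alternative
-- what changed: Replaces the inline running-min/max state loop by materializing the prefix-minimum and prefix-maximum tables with itertools.accumulate and then counting strict adjacent changes in each table with zip-based passes.
import Mathlib
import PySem

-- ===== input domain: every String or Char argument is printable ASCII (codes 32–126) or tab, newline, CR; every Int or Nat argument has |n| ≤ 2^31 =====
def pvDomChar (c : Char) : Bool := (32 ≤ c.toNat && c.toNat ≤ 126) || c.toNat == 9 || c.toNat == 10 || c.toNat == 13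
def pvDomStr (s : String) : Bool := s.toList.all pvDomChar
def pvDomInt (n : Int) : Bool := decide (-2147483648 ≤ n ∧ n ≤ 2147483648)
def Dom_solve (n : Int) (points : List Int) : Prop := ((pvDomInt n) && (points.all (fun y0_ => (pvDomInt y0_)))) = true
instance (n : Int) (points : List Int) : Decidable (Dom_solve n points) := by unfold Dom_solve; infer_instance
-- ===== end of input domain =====

-- B replaces A's inline running-min/max loop by accumulate-built prefix-extrema
-- tables scanned for strict adjacent changes (objective: alternative decomposition).

-- ===== PORT A =====
-- A's for-loop over range(1, n) with state (res, mn, mx).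
-- one iteration of A's loop body on state (res, mn, mx) with p = points[i]
def pvStepA (s : Int × Int × Int) (p : Int) : Int × Int × Int :=
  (s.1 + (if p < s.2.1 then 1 else 0) + (if p > s.2.2 then 1 else 0),
   min s.2.1 p, max s.2.2 p)

def solve (n : Int) (points : List Int) : Int :=
  ((PySem.List.pyRange 1 n 1).foldl
    (fun s i => pvStepA s (PySem.List.pyGetD points i 0))
    (0, PySem.List.pyGetD points 0 0, PySem.List.pyGetD points 0 0)).1

-- ===== PORT B =====
-- itertools.accumulate(pts, f): running fold keeping every intermediate value.
def pvAccumFrom (f : Int → Int → Int) (acc : Int) : List Int → List Int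
  | [] => []
  | x :: xs => (f acc x) :: pvAccumFrom f (f acc x) xs

def pvAccumulate (f : Int → Int → Int) : List Int → List Int
  | [] => []
  | x :: xs => x :: pvAccumFrom f x xs

-- sum(b < a for a, b in zip(l, l[1:])) — a 0/1-sum of booleans is a countP.
def pvCountAdj (p : Int → Int → Bool) (l : List Int) : Int :=
  ((l.zip (PySem.List.slice l (some 1) none)).countP (fun q => p q.1 q.2) : Int)

def solve_alt (n : Int) (points : List Int) : Int :=
  let pts := PySem.List.slice points none (some (max n 0))
  let pmin := pvAccumulate min pts
  let pmax := pvAccumulate max pts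
  pvCountAdj (fun a b => b < a) pmin + pvCountAdj (fun a b => b > a) pmax

-- ===== PRECONDITION & SPEC =====
-- A indexes points[0] and points[i] for i < n, so it raises IndexError exactly
-- when points is empty or n exceeds len(points); Pre_ excludes exactly those.
def Pre_solve (n : Int) (points : List Int) : Prop :=
  points ≠ [] ∧ n ≤ (points.length : Int)
instance (n : Int) (points : List Int) : Decidable (Pre_solve n points) := by
  unfold Pre_solve; infer_instance

def pvWitness_solve : Int × List Int := (4, [3, 1, 4, 1])

def Spec_solve (n : Int) (points : List Int) (out : Int) : Prop := out = solve_alt n points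
instance (n : Int) (points : List Int) (out : Int) : Decidable (Spec_solve n points out) := by unfold Spec_solve; infer_instance

-- ===== CLAIM (what is proved, stated in full; the proofs are below) =====
def Claim_equal_solve : Prop := ∀ (n : Int) (points : List Int), Dom_solve n points → Pre_solve n points → Spec_solve n points (solve n points)

-- ===== LEMMAS AND PROOFS =====

-- Recursion for the adjacent-pair count.
theorem pvCountAdj_cons2 (p : Int → Int → Bool) (a b : Int) (t : List Int) :
    pvCountAdj p (a :: b :: t) = (if p a b then 1 else 0) + pvCountAdj p (b :: t) := by
  simp [pvCountAdj, PySem.List.slice_from_one, List.countP_cons]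
  split_ifs <;> omega

theorem pvCountAdj_single (p : Int → Int → Bool) (a : Int) :
    pvCountAdj p [a] = 0 := by
  simp [pvCountAdj, PySem.List.slice_from_one]

-- The loop invariant: A's fold over the remaining elements equals res plus the
-- strict-change counts of the accumulate tables seeded with the current mn/mx.
theorem pv_main (l : List Int) (res mn mx : Int) :
    ((l.foldl pvStepA (res, mn, mx)).1)
    = res + pvCountAdj (fun a b => b < a) (mn :: pvAccumFrom min mn l)
          + pvCountAdj (fun a b => b > a) (mx :: pvAccumFrom max mx l) := by
  induction l generalizing res mn mx with
  | nil => simp [pvAccumFrom, pvCountAdj_single]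
  | cons x t ih =>
    simp only [List.foldl_cons, pvAccumFrom, pvCountAdj_cons2, decide_eq_true_eq]
    rw [show pvStepA (res, mn, mx) x
        = (res + (if x < mn then 1 else 0) + (if x > mx then 1 else 0),
           min mn x, max mx x) from rfl, ih]
    have h1 : (min mn x < mn) = (x < mn) := propext (by omega)
    have h2 : (mx < max mx x) = (mx < x) := propext (by omega)
    simp only [gt_iff_lt, h1, h2]
    split_ifs <;> omega

-- A's fold over pyRange 1 n indexing `points` equals the same fold over the
-- tail of the prefix pts = points.take n.toNat, when 1 ≤ n ≤ len points.
theorem pv_range_to_list (n : Int) (points : List Int) (h1 : 1 ≤ n)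
    (h2 : n ≤ (points.length : Int))
    (init : Int × Int × Int) :
    (PySem.List.pyRange 1 n 1).foldl (fun s i => pvStepA s (PySem.List.pyGetD points i 0)) init
      = ((points.take n.toNat).drop 1).foldl pvStepA init := by
  have hl : (((points.take n.toNat).length : Nat) : Int) = n := by
    simp [List.length_take]; omega
  have hcongr : (PySem.List.pyRange 1 n 1).foldl
      (fun s i => pvStepA s (PySem.List.pyGetD points i 0)) init
      = (PySem.List.pyRange 1 n 1).foldl
      (fun s i => pvStepA s (PySem.List.pyGetD (points.take n.toNat) i 0)) init := by
    refine PySem.List.foldl_congr_mem _ _ _ _ (fun acc x hx => ?_)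
    have hx' := (PySem.List.mem_pyRange_one).1 hx
    rw [PySem.List.pyGetD_eq_getElem points 0 (by omega) (by omega),
        PySem.List.pyGetD_eq_getElem (points.take n.toNat) 0 (by omega)
          (by simp [List.length_take]; omega)]
    rw [List.getElem_take]
  rw [hcongr]
  rw [show PySem.List.pyRange 1 n = PySem.List.pyRange 1 (((points.take n.toNat).length : Nat) : Int) from by rw [hl]]
  rw [PySem.List.foldl_pyRange_pyGetD' (points.take n.toNat) 0 pvStepA init (by norm_num)]
  norm_num

-- ===== VERDICT (by name: the statement is the Claim_ definition above) =====
theorem solve_spec : Claim_equal_solve := by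
  intro n points _ hpre
  obtain ⟨hne, hlen⟩ := hpre
  unfold Spec_solve
  simp only [solve, solve_alt]
  by_cases hn : n ≤ 0
  · have hr : PySem.List.pyRange 1 n 1 = [] := PySem.List.pyRange_one_eq_nil (by omega)
    have hm : max n 0 = 0 := by omega
    have hs : PySem.List.slice points none (some (max n 0)) = [] := by
      rw [hm, PySem.List.slice_to points (by omega)]
      simp
    simp [hr, hs, pvAccumulate, pvCountAdj]
  · have h1 : 1 ≤ n := by omega
    have hs : PySem.List.slice points none (some (max n 0)) = points.take n.toNat := by
      rw [show max n 0 = n from by omega]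
      exact PySem.List.slice_to points (by omega)
    obtain ⟨p0, rest, hpts⟩ : ∃ p0 rest, points.take n.toNat = p0 :: rest := by
      cases hp : points.take n.toNat with
      | nil =>
        exfalso
        have h0 : (points.take n.toNat).length = 0 := by rw [hp]; rfl
        rw [List.length_take] at h0
        omega
      | cons a l => exact ⟨a, l, rfl⟩
    have hp0 : PySem.List.pyGetD points 0 0 = p0 := by
      rw [PySem.List.pyGetD_eq_getElem points 0 (by omega) (by omega)]
      have h00 : (points.take n.toNat)[0]'(by rw [hpts]; simp) = p0 := by
        simp [hpts]
      rw [List.getElem_take] at h00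
      simpa using h00
    rw [pv_range_to_list n points h1 hlen, hs, hpts, hp0]
    simp only [List.drop_one, List.tail_cons, pvAccumulate]
    rw [pv_main]
    ring
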